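-- pv_equiv track=rewrite | github.com/RuyiLi/cs444 | type_link.py | resolve_prefixes
-- ===== SOURCE A (Python) =====
-- from typing import List
--
-- def resolve_prefixes(qualified_name: str) -> List[str]:
--     prefixes = []
--     identifiers = qualified_name.split(".")
--     curr_name = ""
--     for i in range(len(identifiers)):
--         curr_name = f"{curr_name}.{identifiers[i]}" if curr_name else identifiers[i]
--         prefixes.append(curr_name)
--     return prefixes
-- ===== SOURCE B (Python) =====
-- from typing import List
--
-- def resolve_prefixes(qualified_name: str) -> List[str]:
--     prefixes = [qualified_name[:i] for i, ch in enumerate(qualified_name) if ch == "."]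
--     prefixes.append(qualified_name)
--     return prefixes
-- ===== Notes on version B (the rewrite author's own statement) =====
-- stated objective: alternative
-- what changed: B scans the raw string once for dot positions and emits the slice before each dot plus the whole string, instead of splitting on the dot separator and re-accumulating joined tokens.
-- intended difference: On names whose first character is a dot, A's truthiness check silently drops the leading dots from every prefix (on the witness .a it returns the prefixes without the dot), while B returns the literal cumulative prefixes of the name, which is the intended behaviour. — e.g. on resolve_prefixes(".a"): A returns ["", "a"], B returns ["", ".a"]
import Mathlib
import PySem

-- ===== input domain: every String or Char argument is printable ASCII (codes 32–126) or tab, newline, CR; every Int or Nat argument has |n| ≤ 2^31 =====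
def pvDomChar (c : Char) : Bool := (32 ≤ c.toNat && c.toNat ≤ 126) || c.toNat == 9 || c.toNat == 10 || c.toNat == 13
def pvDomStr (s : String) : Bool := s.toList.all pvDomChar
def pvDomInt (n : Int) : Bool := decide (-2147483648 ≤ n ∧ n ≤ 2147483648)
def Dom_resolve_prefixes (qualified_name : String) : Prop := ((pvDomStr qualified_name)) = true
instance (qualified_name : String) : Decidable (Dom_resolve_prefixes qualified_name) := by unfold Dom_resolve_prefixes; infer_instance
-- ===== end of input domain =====

-- B scans the string once for dot positions and emits the slice before each dot plus the
-- whole string, instead of splitting on the dot separator and re-accumulating joined tokens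
-- (objective: alternative decomposition; equivalence proved outside D_, where A drops leading dots).

-- ===== PORT A =====
-- literal port of A: split on ".", then accumulate joined prefixes with Python's truthiness check
def resolve_prefixes (qualified_name : String) : List String :=
  let identifiers := (PySem.Str.split? qualified_name ".").getD []
  (identifiers.foldl
    (fun (st : List String × String) ident =>
      let curr_name := if st.2 ≠ "" then st.2 ++ "." ++ ident else ident
      (st.1 ++ [curr_name], curr_name))
    ([], "")).1

-- ===== PORT B =====
-- literal port of B: comprehension over enumerate(qualified_name) collecting the slice
-- qualified_name[:i] before each '.', then the whole string appended
def resolve_prefixes_alt (qualified_name : String) : List String :=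
  (((PySem.List.enumerate qualified_name.toList 0).filter (fun p => p.2 == '.')).map
    (fun p => PySem.Str.slice qualified_name none (some p.1))) ++ [qualified_name]

-- ===== PRECONDITION & SPEC =====
-- On names whose first character is a dot, A's truthiness check silently drops the
-- leading dots from every prefix, while B returns the literal cumulative prefixes of
-- the name, which is the intended behaviour.
def D_resolve_prefixes (qualified_name : String) : Prop :=
  qualified_name.toList.head? = some '.'
instance (qualified_name : String) : Decidable (D_resolve_prefixes qualified_name) := by
  unfold D_resolve_prefixes; infer_instance

def Spec_resolve_prefixes (qualified_name : String) (out : List String) : Prop :=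
  ¬ D_resolve_prefixes qualified_name → out = resolve_prefixes_alt qualified_name
instance (qualified_name : String) (out : List String) : Decidable (Spec_resolve_prefixes qualified_name out) := by
  unfold Spec_resolve_prefixes; infer_instance

def pvDiffWitness_resolve_prefixes : String := ".a"
def pvDiffWitnessOut_resolve_prefixes : (List String) × (List String) := (["", "a"], ["", ".a"])

-- ===== CLAIM (what is proved, stated in full; the proofs are below) =====
def Claim_unchanged_resolve_prefixes : Prop := ∀ (qualified_name : String), Dom_resolve_prefixes qualified_name → Spec_resolve_prefixes qualified_name (resolve_prefixes qualified_name)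
def Claim_changed_resolve_prefixes : Prop := Dom_resolve_prefixes (pvDiffWitness_resolve_prefixes) ∧ D_resolve_prefixes (pvDiffWitness_resolve_prefixes) ∧ resolve_prefixes (pvDiffWitness_resolve_prefixes) = pvDiffWitnessOut_resolve_prefixes.1 ∧ resolve_prefixes_alt (pvDiffWitness_resolve_prefixes) = pvDiffWitnessOut_resolve_prefixes.2 ∧ pvDiffWitnessOut_resolve_prefixes.1 ≠ pvDiffWitnessOut_resolve_prefixes.2

-- ===== LEMMAS AND PROOFS =====

-- specification-level split on '.' (what Python str.split does for the one-char separator ".")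
def splitDot : List Char → List (List Char)
  | [] => [[]]
  | c :: r =>
    if c = '.' then [] :: splitDot r
    else match splitDot r with
      | t :: ts => (c :: t) :: ts
      | [] => [[c]]

theorem splitDot_ne_nil (cs : List Char) : splitDot cs ≠ [] := by
  cases cs with
  | nil => simp [splitDot]
  | cons c r =>
    simp only [splitDot]
    split
    · simp
    · split <;> simp

theorem go_splitOn (fuel : Nat) : ∀ (l cur : List Char) (acc : List (List Char)),
    l.length ≤ fuel →
    PySem.Chars.splitOn.go ['.'] fuel l cur acc =
      acc.reverse ++ (match splitDot l with
        | t :: ts => (cur.reverse ++ t) :: ts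
        | [] => []) := by
  induction fuel with
  | zero =>
    intro l cur acc h
    have : l = [] := by cases l <;> simp_all
    subst this
    simp [PySem.Chars.splitOn.go, splitDot]
  | succ fuel ih =>
    intro l cur acc h
    cases l with
    | nil => simp [PySem.Chars.splitOn.go, splitDot]
    | cons c rest =>
      rcases hs : splitDot rest with _ | ⟨t, ts⟩
      · exact absurd hs (splitDot_ne_nil rest)
      by_cases hc : c = '.'
      · subst hc
        rw [PySem.Chars.splitOn.go]
        have hp : List.isPrefixOf ['.'] ('.'::rest) = true := by
          simp [List.isPrefixOf]
        rw [if_pos hp]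
        simp only [List.length_singleton, List.drop_succ_cons, List.drop_zero]
        simp only [List.length_cons] at h
        rw [ih rest [] (cur.reverse :: acc) (by omega)]
        simp [splitDot, hs]
      · rw [PySem.Chars.splitOn.go]
        have hp : List.isPrefixOf ['.'] (c::rest) = false := by
          simp [List.isPrefixOf]
          exact fun h => hc h.symm
        rw [if_neg (by simp [hp])]
        simp only [List.length_cons] at h
        rw [ih rest (c :: cur) acc (by omega)]
        simp [splitDot, hs, hc]

theorem splitOn_eq_splitDot (cs : List Char) :
    PySem.Chars.splitOn cs ['.'] = splitDot cs := by
  rw [PySem.Chars.splitOn, go_splitOn _ _ _ _ (by omega)]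
  rcases hs : splitDot cs with _ | ⟨t, ts⟩
  · exact absurd hs (splitDot_ne_nil cs)
  · simp

-- the always-join step (A's step once curr is nonempty), on char lists
def stepJ (st : List (List Char) × List Char) (t : List Char) : List (List Char) × List Char :=
  (st.1 ++ [st.2 ++ '.' :: t], st.2 ++ '.' :: t)

-- A's step with the truthiness test, on char lists
def stepL (st : List (List Char) × List Char) (t : List Char) : List (List Char) × List Char :=
  let c := if st.2 ≠ [] then st.2 ++ '.' :: t else t
  (st.1 ++ [c], c)

-- B's scan as structural recursion on the characters
def mach : List Char → List (List Char) → List Char → List (List Char)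
  | [], acc, curr => acc ++ [curr]
  | c :: r, acc, curr =>
    if c = '.' then mach r (acc ++ [curr]) (curr ++ ['.'])
    else mach r acc (curr ++ [c])

-- the prefixes emitted at each dot, recursively
def dotTakes : List Char → List (List Char)
  | [] => []
  | c :: r =>
    (if c = '.' then [[]] else []) ++ (dotTakes r).map (c :: ·)

theorem foldl_stepL_eq_stepJ (ts : List (List Char)) :
    ∀ (acc : List (List Char)) (curr : List Char), curr ≠ [] →
    ts.foldl stepL (acc, curr) = ts.foldl stepJ (acc, curr) := by
  induction ts with
  | nil => intro acc curr h; rfl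
  | cons t ts ih =>
    intro acc curr h
    simp only [List.foldl_cons, stepL, stepJ, if_pos h]
    exact ih _ _ (by simp)

theorem foldl_stepJ_eq_mach (cs : List Char) :
    ∀ (acc : List (List Char)) (curr : List Char),
    ((match splitDot cs with
      | t :: ts => ts.foldl stepJ (acc ++ [curr ++ t], curr ++ t)
      | [] => (acc, curr)).1) = mach cs acc curr := by
  induction cs with
  | nil => intro acc curr; simp [splitDot, mach]
  | cons c r ih =>
    intro acc curr
    rcases hs : splitDot r with _ | ⟨t, ts⟩
    · exact absurd hs (splitDot_ne_nil r)
    by_cases hc : c = '.'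
    · subst hc
      simp only [splitDot, hs, mach]
      have := ih (acc ++ [curr]) (curr ++ ['.'])
      rw [hs] at this
      simpa [stepJ] using this
    · simp only [splitDot, hs, mach, if_neg hc]
      have := ih acc (curr ++ [c])
      rw [hs] at this
      simpa using this

theorem mach_eq_dotTakes (cs : List Char) :
    ∀ (acc : List (List Char)) (curr : List Char),
    mach cs acc curr = acc ++ (dotTakes cs).map (curr ++ ·) ++ [curr ++ cs] := by
  induction cs with
  | nil => intro acc curr; simp [mach, dotTakes]
  | cons c r ih =>
    intro acc curr
    by_cases hc : c = '.'
    · subst hc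
      rw [mach, if_pos rfl, ih]
      simp [dotTakes, List.map_map, Function.comp_def]
    · rw [mach, if_neg hc, ih]
      simp [dotTakes, hc, List.map_map, Function.comp_def]

theorem enumerate_shift {α : Type} (xs : List α) : ∀ (s : Int),
    PySem.List.enumerate xs (s + 1) = (PySem.List.enumerate xs s).map (fun p => (p.1 + 1, p.2)) := by
  induction xs with
  | nil => intro s; simp [PySem.List.enumerate_nil]
  | cons x xs ih =>
    intro s
    rw [PySem.List.enumerate_cons, PySem.List.enumerate_cons, ih]
    simp

theorem shifted_map (h : Char) (r : List Char) :
    List.map (fun p => PySem.List.slice (h :: r) none (some p.1))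
      (List.map (fun p : Int × Char => (p.1 + 1, p.2))
        (List.filter ((fun p : Int × Char => p.2 == '.') ∘ fun p : Int × Char => (p.1 + 1, p.2))
          (PySem.List.enumerate r)))
    = List.map (h :: ·)
        (List.map (fun p => PySem.List.slice r none (some p.1))
          (List.filter (fun p : Int × Char => p.2 == '.') (PySem.List.enumerate r))) := by
  have hfil : List.filter ((fun p : Int × Char => p.2 == '.') ∘ fun p : Int × Char => (p.1 + 1, p.2))
      (PySem.List.enumerate r) = List.filter (fun p : Int × Char => p.2 == '.') (PySem.List.enumerate r) := by
    simp [Function.comp_def]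
  rw [hfil, List.map_map, List.map_map]
  apply List.map_congr_left
  intro p hp
  have hp0 : (0:Int) ≤ p.1 := by
    have hmem := List.mem_of_mem_filter hp
    obtain ⟨k, hk, rfl⟩ := (PySem.List.mem_enumerate_iff r 0 p).1 hmem
    simp
  simp only [Function.comp_def]
  rw [PySem.List.slice_to _ (by omega), PySem.List.slice_to _ hp0]
  have ht : (p.1 + 1).toNat = p.1.toNat + 1 := by omega
  rw [ht, List.take_succ_cons]

theorem enum_filter_map_eq_dotTakes (cs : List Char) :
    ((PySem.List.enumerate cs 0).filter (fun p => p.2 == '.')).map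
      (fun p => PySem.List.slice cs none (some p.1)) = dotTakes cs := by
  induction cs with
  | nil => simp [PySem.List.enumerate_nil, dotTakes]
  | cons c r ih =>
    rw [PySem.List.enumerate_cons]
    rw [show (0:Int) + 1 = 0 + 1 from rfl, enumerate_shift r 0]
    rw [List.filter_cons, List.filter_map]
    by_cases hc : c = '.'
    · subst hc
      simp only [beq_self_eq_true, if_pos]
      rw [List.map_cons, shifted_map, ih]
      have h0 : PySem.List.slice ('.' :: r) none (some ((0:Int))) = [] := by
        rw [PySem.List.slice_to _ le_rfl]; simp
      rw [h0]
      simp [dotTakes]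
    · rw [if_neg (by simp [hc]), shifted_map, ih]
      simp [dotTakes, hc]

theorem char_main (cs : List Char) (h : cs.head? ≠ some '.') :
    ((splitDot cs).foldl stepL ([], [])).1 = dotTakes cs ++ [cs] := by
  cases cs with
  | nil => simp [splitDot, stepL, dotTakes]
  | cons c r =>
    have hc : c ≠ '.' := by simpa using h
    rcases hs : splitDot r with _ | ⟨t, ts⟩
    · exact absurd hs (splitDot_ne_nil r)
    have hsplit : splitDot (c :: r) = (c :: t) :: ts := by
      simp [splitDot, hc, hs]
    rw [hsplit, List.foldl_cons]
    have h1 : stepL (([] : List (List Char)), ([] : List Char)) (c :: t) = ([c :: t], c :: t) := by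
      simp [stepL]
    rw [h1, foldl_stepL_eq_stepJ ts _ _ (by simp)]
    have h2 := foldl_stepJ_eq_mach (c :: r) [] []
    rw [hsplit] at h2
    simp only [List.nil_append] at h2
    rw [h2, mach_eq_dotTakes]
    simp

theorem ofList_eq_empty_iff (c : List Char) : String.ofList c = "" ↔ c = [] := by
  constructor
  · intro h
    have := congrArg String.toList h
    simpa using this
  · intro h; subst h; rfl

theorem fold_ofList (ts : List (List Char)) :
    ∀ (ls : List (List Char)) (c : List Char),
    ((ts.map String.ofList).foldl
      (fun (st : List String × String) ident =>
        (st.1 ++ [if st.2 ≠ "" then st.2 ++ "." ++ ident else ident],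
         if st.2 ≠ "" then st.2 ++ "." ++ ident else ident))
      (ls.map String.ofList, String.ofList c)).1
      = ((ts.foldl stepL (ls, c)).1).map String.ofList := by
  induction ts with
  | nil => intro ls c; rfl
  | cons t ts ih =>
    intro ls c
    simp only [List.map_cons, List.foldl_cons, stepL]
    by_cases hc : c = []
    · subst hc
      rw [if_neg (by simp), if_neg (by simp)]
      have : ls.map String.ofList ++ [String.ofList t] = (ls ++ [t]).map String.ofList := by simp
      rw [this]
      exact ih (ls ++ [t]) t
    · rw [if_pos (by simpa using hc), if_pos (by simpa [ofList_eq_empty_iff] using hc)]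
      have hcat : String.ofList c ++ "." ++ String.ofList t = String.ofList (c ++ '.' :: t) := by
        rw [show ('.' :: t) = ['.'] ++ t from rfl, String.ofList_append, String.ofList_append]
        rw [show String.ofList ['.'] = "." from rfl, String.append_assoc]
      rw [hcat]
      have : ls.map String.ofList ++ [String.ofList (c ++ '.' :: t)] = (ls ++ [c ++ '.' :: t]).map String.ofList := by simp
      rw [this]
      exact ih (ls ++ [c ++ '.' :: t]) (c ++ '.' :: t)

theorem string_main (q : String) (h : ¬ q.toList.head? = some '.') :
    resolve_prefixes q = resolve_prefixes_alt q := by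
  have hsplit : (PySem.Str.split? q ".").getD [] = (splitDot q.toList).map String.ofList := by
    simp [PySem.Str.split?, PySem.Chars.split?, splitOn_eq_splitDot]
  have hA : resolve_prefixes q = (dotTakes q.toList ++ [q.toList]).map String.ofList := by
    have hf := fold_ofList (splitDot q.toList) [] []
    simp only [List.map_nil] at hf
    rw [show String.ofList ([] : List Char) = "" from rfl] at hf
    simp only [resolve_prefixes, hsplit]
    rw [hf, char_main q.toList h]
  have hfun : (fun p : Int × Char => PySem.Str.slice q none (some p.1))
      = fun p : Int × Char => String.ofList (PySem.List.slice q.toList none (some p.1)) := by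
    funext p
    rw [show String.ofList (PySem.List.slice q.toList none (some p.1))
          = String.ofList ((PySem.Str.slice q none (some p.1)).toList) by
        rw [PySem.Str.toList_slice, PySem.Chars.slice_eq_listSlice]]
    exact String.ofList_toList.symm
  have hB : resolve_prefixes_alt q = (dotTakes q.toList ++ [q.toList]).map String.ofList := by
    simp only [resolve_prefixes_alt, hfun]
    rw [show (fun p : Int × Char => String.ofList (PySem.List.slice q.toList none (some p.1)))
          = String.ofList ∘ (fun p : Int × Char => PySem.List.slice q.toList none (some p.1)) from rfl]
    rw [← List.map_map, enum_filter_map_eq_dotTakes]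
    simp [String.ofList_toList]
  rw [hA, hB]

-- ===== VERDICT (by name: the statements are the Claim_ definitions above) =====
theorem resolve_prefixes_spec : Claim_unchanged_resolve_prefixes := by
  intro q _ hnd
  exact string_main q hnd

theorem resolve_prefixes_changed : Claim_changed_resolve_prefixes := by
  unfold Claim_changed_resolve_prefixes; decide
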